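-- pv_equiv track=rewrite | github.com/swjtu-dev-squad/socitwin | backend/app/services/persona/sqlite_seed.py | relax_kol_normal_in_set
-- ===== SOURCE A (Python) =====
-- from typing import Any, Dict, Iterable, List, Set
--
-- def relax_kol_normal_in_set(chosen: List[str], types: Dict[str, str], pool: List[str], mandatory: Set[str]) -> List[str]:
--     def count_kol(ids: Iterable[str]) -> int:
--         return sum(1 for i in ids if types.get(i, "normal") == "kol")
--
--     def count_normal(ids: Iterable[str]) -> int:
--         return sum(1 for i in ids if types.get(i, "normal") != "kol")
--
--     cur = list(chosen)
--     guard = 0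
--     while guard < 5000:
--         guard += 1
--         k = count_kol(cur)
--         n = count_normal(cur)
--         if k == 0 or n >= 10 * k:
--             break
--         victim = next((x for x in cur if types.get(x, "normal") == "kol" and x not in mandatory), None)
--         if victim is None:
--             break
--         cur_set = set(cur)
--         replacement = next((x for x in pool if x not in cur_set and types.get(x, "normal") != "kol"), None)
--         if replacement is None:
--             break
--         idx = cur.index(victim)
--         cur[idx] = replacement
--     return cur
-- ===== SOURCE B (Python) =====
-- def relax_kol_normal_in_set(chosen, types, pool, mandatory):
--     def is_kol(x):
--         return types.get(x, "normal") == "kol"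
--
--     k = sum(1 for x in chosen if is_kol(x))
--     n = len(chosen) - k
--     if k == 0 or n >= 10 * k:
--         return list(chosen)
--     # number of swaps A would perform: smallest s with n+s >= 10*(k-s), capped by A's 5000-iteration guard
--     need = min((10 * k - n + 10) // 11, 5000)
--     # replacements, in pool order: not kol, not already present, each used once
--     seen = set(chosen)
--     reps = []
--     for x in pool:
--         if x not in seen and not is_kol(x):
--             seen.add(x)
--             reps.append(x)
--     rs = reps[:min(need, len(reps))]
--     # single left-to-right pass: replace the first len(rs) non-mandatory kols
--     out = []
--     ri = 0
--     for x in chosen: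
--         if ri < len(rs) and is_kol(x) and x not in mandatory:
--             out.append(rs[ri])
--             ri += 1
--         else:
--             out.append(x)
--     return out
-- ===== Notes on version B (the rewrite author's own statement) =====
-- stated objective: alternative
-- what changed: A repeatedly rescans the list (recounting kol/normal and re-searching victim and replacement from scratch for every swap, up to 5000 iterations); B computes the required number of swaps in closed form from the initial counts, collects the eligible replacements in one pass over the pool, and performs all substitutions in a single left-to-right pass over chosen.
import Mathlib
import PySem

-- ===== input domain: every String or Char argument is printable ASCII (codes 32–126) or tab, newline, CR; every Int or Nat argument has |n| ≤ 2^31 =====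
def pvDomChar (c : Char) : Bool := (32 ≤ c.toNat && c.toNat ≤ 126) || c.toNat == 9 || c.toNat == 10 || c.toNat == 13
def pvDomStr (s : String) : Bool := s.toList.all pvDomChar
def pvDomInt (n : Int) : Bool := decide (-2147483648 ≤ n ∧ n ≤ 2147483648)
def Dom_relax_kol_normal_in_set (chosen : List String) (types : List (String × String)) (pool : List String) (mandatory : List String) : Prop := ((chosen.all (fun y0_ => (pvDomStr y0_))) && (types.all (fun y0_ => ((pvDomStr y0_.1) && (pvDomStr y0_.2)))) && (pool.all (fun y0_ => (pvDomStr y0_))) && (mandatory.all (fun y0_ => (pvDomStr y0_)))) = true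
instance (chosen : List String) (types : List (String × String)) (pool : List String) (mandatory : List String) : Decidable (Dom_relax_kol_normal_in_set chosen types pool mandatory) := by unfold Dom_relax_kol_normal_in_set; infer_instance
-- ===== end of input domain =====

-- B replaces A's repeated rescan loop (recount + linear victim/replacement search per swap) by a
-- precomputed swap count, one pass collecting eligible replacements, and one substitution pass (objective: alternative).

-- types.get(x, "normal") == "kol"  (used by both programs' inline tests)
def pvIsKol (T : List (String × String)) (x : String) : Bool :=
  (PySem.Dict.mk T).getD x "normal" == "kol"

-- the victim test: kol and not mandatory (both programs' inline test)
def pvVict (T : List (String × String)) (M : List String) (x : String) : Bool :=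
  pvIsKol T x && !(M.contains x)

-- ===== PORT A =====
-- sum(1 for i in ids if types.get(i,"normal") == "kol")
def pvCountKol (T : List (String × String)) (ids : List String) : Int :=
  ids.foldl (fun acc i => if pvIsKol T i then acc + 1 else acc) 0

-- sum(1 for i in ids if types.get(i,"normal") != "kol")
def pvCountNormal (T : List (String × String)) (ids : List String) : Int :=
  ids.foldl (fun acc i => if !(pvIsKol T i) then acc + 1 else acc) 0

-- the while loop; fuel = 5000 - guard
def pvLoopA (T : List (String × String)) (M P : List String) : Nat → List String → List String
  | 0, cur => cur
  | fuel + 1, cur =>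
    if pvCountKol T cur = 0 ∨ pvCountNormal T cur ≥ 10 * pvCountKol T cur then cur
    else
      match cur.find? (pvVict T M) with
      | none => cur
      | some victim =>
        match P.find? (fun x => !(PySem.Set.contains (PySem.Set.ofList cur) x) && !(pvIsKol T x)) with
        | none => cur
        | some repl =>
          match PySem.List.index? cur victim with
          | none => cur  -- unreachable: victim was found in cur
          | some idx => pvLoopA T M P fuel (cur.set idx repl)

def relax_kol_normal_in_set (chosen : List String) (types : List (String × String)) (pool : List String) (mandatory : List String) : List String :=
  pvLoopA types mandatory pool 5000 chosen

-- ===== PORT B =====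
-- the replacement-collection loop of Source B: pool elements that are not kol and not seen yet
def pvPickReps (T : List (String × String)) : List String → PySem.Set String → List String
  | [], _ => []
  | x :: xs, seen =>
    if !(PySem.Set.contains seen x) && !(pvIsKol T x) then
      x :: pvPickReps T xs (PySem.Set.add seen x)
    else pvPickReps T xs seen

-- the output loop of Source B: replace victims left to right while replacements remain
def pvSubst (T : List (String × String)) (M : List String) : List String → List String → List String
  | [], _ => []
  | x :: xs, [] => x :: pvSubst T M xs []
  | x :: xs, r :: rs =>
    if pvVict T M x then r :: pvSubst T M xs rs else x :: pvSubst T M xs (r :: rs)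

-- k, n and need are Nat here: Python's k, n are counts (≥ 0) and 10*k - n is only
-- evaluated under the guard n < 10*k, so Nat arithmetic (incl. //) is exact.
def relax_kol_normal_in_set_alt (chosen : List String) (types : List (String × String)) (pool : List String) (mandatory : List String) : List String :=
  let k := chosen.countP (pvIsKol types)
  let n := chosen.length - k
  if k = 0 ∨ n ≥ 10 * k then chosen
  else
    let need := min ((10 * k - n + 10) / 11) 5000
    let reps := pvPickReps types pool (PySem.Set.ofList chosen)
    let rs := reps.take (min need reps.length)
    pvSubst types mandatory chosen rs

-- ===== PRECONDITION & SPEC =====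
def Spec_relax_kol_normal_in_set (chosen : List String) (types : List (String × String)) (pool : List String) (mandatory : List String) (out : List String) : Prop := out = relax_kol_normal_in_set_alt chosen types pool mandatory
instance (chosen : List String) (types : List (String × String)) (pool : List String) (mandatory : List String) (out : List String) : Decidable (Spec_relax_kol_normal_in_set chosen types pool mandatory out) := by unfold Spec_relax_kol_normal_in_set; infer_instance

-- ===== CLAIM (what is proved, stated in full; the proofs are below) =====
def Claim_equal_relax_kol_normal_in_set : Prop := ∀ (chosen : List String) (types : List (String × String)) (pool : List String) (mandatory : List String), Dom_relax_kol_normal_in_set chosen types pool mandatory → Spec_relax_kol_normal_in_set chosen types pool mandatory (relax_kol_normal_in_set chosen types pool mandatory)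

-- ===== LEMMAS AND PROOFS =====

-- proof-side: pvPickReps with the "seen" set abstracted to a membership function
def pvRepsF (isK : String → Bool) : List String → (String → Bool) → List String
  | [], _ => []
  | x :: xs, f =>
    if !(f x) && !(isK x) then x :: pvRepsF isK xs (fun y => y == x || f y)
    else pvRepsF isK xs f

-- proof-side: replace the first p-element by r (what one iteration of A's loop does to cur)
def pvReplF (p : String → Bool) (r : String) : List String → List String
  | [] => []
  | x :: xs => if p x then r :: xs else x :: pvReplF p r xs

-- proof-side: number of swaps A's loop will perform from state cur (ignoring fuel and availability)
def pvNeedRaw (T : List (String × String)) (cur : List String) : Nat :=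
  if cur.countP (pvIsKol T) = 0 ∨
      10 * cur.countP (pvIsKol T) ≤ cur.length - cur.countP (pvIsKol T) then 0
  else (10 * cur.countP (pvIsKol T) - (cur.length - cur.countP (pvIsKol T)) + 10) / 11

lemma pv_foldl_count {α : Type} (q : α → Bool) : ∀ (l : List α) (a : Int),
    l.foldl (fun acc i => if q i then acc + 1 else acc) a = a + l.countP q := by
  intro l
  induction l with
  | nil => simp
  | cons x xs ih =>
    intro a
    by_cases h : q x <;> simp [h, List.countP_cons, ih] <;> push_cast <;> ring

lemma pvCountKol_eq (T : List (String × String)) (l : List String) :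
    pvCountKol T l = (l.countP (pvIsKol T) : Int) := by
  simpa using pv_foldl_count (pvIsKol T) l 0

lemma pvCountNormal_eq (T : List (String × String)) (l : List String) :
    pvCountNormal T l = ((l.length : Int) - l.countP (pvIsKol T)) := by
  have h2 : l.countP (fun i => !(pvIsKol T i)) + l.countP (pvIsKol T) = l.length := by
    induction l with
    | nil => simp
    | cons x xs ih => by_cases hx : pvIsKol T x <;> simp [List.countP_cons, hx] <;> omega
  have h := pv_foldl_count (fun i => !(pvIsKol T i)) l 0
  unfold pvCountNormal
  rw [h]
  push_cast [← h2]
  ring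

lemma pv_take_min_length {α : Type} (l : List α) (a : ℕ) : l.take (min a l.length) = l.take a := by
  rcases le_total a l.length with h | h
  · rw [min_eq_left h]
  · rw [min_eq_right h, List.take_of_length_le h, List.take_of_length_le (by simp)]

lemma pvSubst_nil (T : List (String × String)) (M : List String) :
    ∀ cur, pvSubst T M cur [] = cur := by
  intro cur
  induction cur with
  | nil => rfl
  | cons x xs ih => simp [pvSubst, ih]

lemma pvSubst_no_victim (T : List (String × String)) (M : List String) :
    ∀ cur rs, cur.find? (pvVict T M) = none → pvSubst T M cur rs = cur := by
  intro cur
  induction cur with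
  | nil => intro rs _; rfl
  | cons x xs ih =>
    intro rs h
    simp only [List.find?_cons] at h
    by_cases hx : pvVict T M x
    · simp [hx] at h
    have hxs : xs.find? (pvVict T M) = none := by
      simpa [hx] using h
    cases rs with
    | nil => simp [pvSubst, ih _ hxs]
    | cons r rs' => simp [pvSubst, hx, ih _ hxs]

lemma pvSubst_cons_head (T : List (String × String)) (M : List String) (a : String)
    (xs rs : List String) (h : pvVict T M a = false) :
    pvSubst T M (a :: xs) rs = a :: pvSubst T M xs rs := by
  cases rs with
  | nil => rfl
  | cons r rs' => simp [pvSubst, h]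

lemma pvSubst_step (T : List (String × String)) (M : List String) (r : String)
    (h : pvVict T M r = false) :
    ∀ cur rs, pvSubst T M cur (r :: rs) = pvSubst T M (pvReplF (pvVict T M) r cur) rs := by
  intro cur
  induction cur with
  | nil => intro rs; rfl
  | cons x xs ih =>
    intro rs
    by_cases hx : pvVict T M x
    · simp [pvSubst, pvReplF, hx, pvSubst_cons_head T M r xs rs h]
    · simp [pvSubst, pvReplF, hx, ih, pvSubst_cons_head T M x (pvReplF (pvVict T M) r xs) rs (by simp [hx])]

lemma pvRepsF_congr (isK : String → Bool) :
    ∀ (xs : List String) (f g : String → Bool),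
      (∀ y, isK y = false → f y = g y) → pvRepsF isK xs f = pvRepsF isK xs g := by
  intro xs
  induction xs with
  | nil => intro f g _; rfl
  | cons x xs ih =>
    intro f g hfg
    by_cases hk : isK x
    · simp only [pvRepsF, hk]
      simp only [Bool.not_true, Bool.and_false]
      exact ih f g hfg
    · have hx := hfg x (by simpa using hk)
      simp only [pvRepsF, hx]
      by_cases he : !(g x) && !(isK x)
      · simp only [he, if_true]
        rw [ih _ _ (fun y hy => by rw [hfg y hy])]
      · simp only [he, if_false]
        exact ih f g hfg

lemma pv_contains_add (s : PySem.Set String) (x y : String) :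
    PySem.Set.contains (PySem.Set.add s x) y = (y == x || PySem.Set.contains s y) := by
  by_cases h : y = x <;> by_cases h2 : y ∈ s <;>
    simp [PySem.Set.contains, List.contains_eq_mem, PySem.Set.mem_add, h, h2]

lemma pvPickReps_eq_repsF (T : List (String × String)) :
    ∀ (xs : List String) (s : PySem.Set String),
      pvPickReps T xs s = pvRepsF (pvIsKol T) xs (fun y => PySem.Set.contains s y) := by
  intro xs
  induction xs with
  | nil => intro s; rfl
  | cons x xs ih =>
    intro s
    simp only [pvPickReps, pvRepsF]
    by_cases he : !(PySem.Set.contains s x) && !(pvIsKol T x)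
    · simp only [he, if_true]
      rw [ih]
      have := pvRepsF_congr (pvIsKol T) xs
        (fun y => PySem.Set.contains (PySem.Set.add s x) y)
        (fun y => y == x || PySem.Set.contains s y)
        (fun y _ => pv_contains_add s x y)
      simp only [this]
    · simp only [he, if_false]
      exact ih s

lemma pvRepsF_nil (isK : String → Bool) :
    ∀ (xs : List String) (f : String → Bool), pvRepsF isK xs f = [] →
      xs.find? (fun x => !(f x) && !(isK x)) = none := by
  intro xs
  induction xs with
  | nil => intro f _; rfl
  | cons x xs ih =>
    intro f h
    simp only [pvRepsF] at h
    by_cases he : !(f x) && !(isK x)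
    · simp [he] at h
    · rw [List.find?_cons_of_neg (by simpa using he)]
      rw [if_neg he] at h
      exact ih f h

lemma pvRepsF_cons (isK : String → Bool) :
    ∀ (xs : List String) (f : String → Bool) (r : String) (rs : List String),
      pvRepsF isK xs f = r :: rs →
      xs.find? (fun x => !(f x) && !(isK x)) = some r ∧ isK r = false ∧
        pvRepsF isK xs (fun y => y == r || f y) = rs := by
  intro xs
  induction xs with
  | nil => intro f r rs h; simp [pvRepsF] at h
  | cons x xs ih =>
    intro f r rs h
    simp only [pvRepsF] at h
    by_cases he : !(f x) && !(isK x)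
    · rw [if_pos he] at h
      have hxr : x = r := (List.cons.injEq .. ▸ h).1
      have hrs : pvRepsF isK xs (fun y => y == x || f y) = rs := (List.cons.injEq .. ▸ h).2
      subst hxr
      refine ⟨List.find?_cons_of_pos he, ?_, ?_⟩
      · simpa using (Bool.and_eq_true _ _ |>.mp he).2
      · simp only [pvRepsF]
        have hc : (!(x == x || f x) && !(isK x)) = false := by simp
        rw [hc]
        simpa using hrs
    · rw [if_neg he] at h
      obtain ⟨h1, h2, h3⟩ := ih f r rs h
      refine ⟨?_, h2, ?_⟩
      · rw [List.find?_cons_of_neg (by simpa using he), h1]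
      · simp only [pvRepsF]
        have hc : (!(x == r || f x) && !(isK x)) = false := by
          revert he; cases hfx : f x <;> cases hkx : isK x <;> simp
        rw [hc]
        simpa using h3

lemma pv_index_set_eq_replF (p : String → Bool) (r : String) :
    ∀ (cur : List String) (v : String), cur.find? p = some v →
      ∃ i, PySem.List.index? cur v = some i ∧ cur.set i r = pvReplF p r cur := by
  intro cur
  induction cur with
  | nil => intro v h; simp at h
  | cons x xs ih =>
    intro v h
    by_cases hx : p x
    · rw [List.find?_cons_of_pos hx] at h
      injection h with h
      subst h
      exact ⟨0, PySem.List.index?_cons_self _ _, by simp [pvReplF, hx]⟩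
    · rw [List.find?_cons_of_neg (by simpa using hx)] at h
      obtain ⟨i, hi, hset⟩ := ih v h
      have hv : p v := by simpa using List.find?_some h
      have hne : x ≠ v := fun e => hx (e ▸ hv)
      refine ⟨i + 1, ?_, ?_⟩
      · rw [PySem.List.index?_cons_of_ne xs hne, hi]; rfl
      · simpa [pvReplF, hx] using hset

lemma pv_length_replF (p : String → Bool) (r : String) :
    ∀ cur, (pvReplF p r cur).length = cur.length := by
  intro cur
  induction cur with
  | nil => rfl
  | cons x xs ih => by_cases hx : p x <;> simp [pvReplF, hx, ih]

lemma pv_countP_replF (T : List (String × String)) (M : List String) (r : String)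
    (hr : pvIsKol T r = false) :
    ∀ (cur : List String) (v : String), cur.find? (pvVict T M) = some v →
      (pvReplF (pvVict T M) r cur).countP (pvIsKol T) + 1 = cur.countP (pvIsKol T) := by
  intro cur
  induction cur with
  | nil => intro v h; simp at h
  | cons x xs ih =>
    intro v h
    by_cases hx : pvVict T M x
    · have hkx : pvIsKol T x = true := by
        have := hx
        unfold pvVict at this
        exact (Bool.and_eq_true _ _ |>.mp this).1
      simp [pvReplF, hx, List.countP_cons, hr, hkx]
    · rw [List.find?_cons_of_neg (by simpa using hx)] at h
      have := ih v h
      by_cases hkx : pvIsKol T x <;> simp [pvReplF, hx, List.countP_cons, hkx] <;> omega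

lemma pv_contains_replF (T : List (String × String)) (M : List String) (r : String) :
    ∀ (cur : List String) (v : String) (y : String), cur.find? (pvVict T M) = some v →
      pvIsKol T y = false →
      (pvReplF (pvVict T M) r cur).contains y = (y == r || cur.contains y) := by
  intro cur
  induction cur with
  | nil => intro v y h _; simp at h
  | cons x xs ih =>
    intro v y h hy
    by_cases hx : pvVict T M x
    · have hyx : (y == x) = false := by
        have hkx : pvIsKol T x = true := by
          have hh := hx; unfold pvVict at hh
          exact (Bool.and_eq_true _ _ |>.mp hh).1
        refine beq_eq_false_iff_ne.mpr (fun e => ?_)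
        rw [e] at hy
        simp [hy] at hkx
      simp only [pvReplF, if_pos hx, List.contains_cons, hyx]
      cases y == r <;> simp
    · rw [List.find?_cons_of_neg (by simpa using hx)] at h
      simp only [pvReplF, if_neg hx, List.contains_cons, ih v y h hy]
      cases y == x <;> cases y == r <;> simp

lemma pv_contains_ofList (cur : List String) (y : String) :
    PySem.Set.contains (PySem.Set.ofList cur) y = cur.contains y := by
  by_cases h : y ∈ cur <;>
    simp [PySem.Set.contains, List.contains_eq_mem, PySem.Set.mem_ofList, h]

-- the main invariant: A's loop, from any state, equals B's substitution pass
lemma pvLoopA_eq (T : List (String × String)) (M P : List String) :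
    ∀ (fuel : Nat) (cur : List String),
      pvLoopA T M P fuel cur =
        pvSubst T M cur ((pvRepsF (pvIsKol T) P (fun y => cur.contains y)).take
          (min (pvNeedRaw T cur) fuel)) := by
  intro fuel
  induction fuel with
  | zero =>
    intro cur
    simp [pvLoopA, pvSubst_nil]
  | succ fuel ih =>
    intro cur
    have hkl : cur.countP (pvIsKol T) ≤ cur.length := List.countP_le_length ..
    have hstep : pvLoopA T M P (fuel + 1) cur =
        (if pvCountKol T cur = 0 ∨ pvCountNormal T cur ≥ 10 * pvCountKol T cur then cur
         else
           match cur.find? (pvVict T M) with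
           | none => cur
           | some victim =>
             match P.find? (fun x => !(PySem.Set.contains (PySem.Set.ofList cur) x) && !(pvIsKol T x)) with
             | none => cur
             | some repl =>
               match PySem.List.index? cur victim with
               | none => cur
               | some idx => pvLoopA T M P fuel (cur.set idx repl)) := rfl
    by_cases hc : cur.countP (pvIsKol T) = 0 ∨
        10 * cur.countP (pvIsKol T) ≤ cur.length - cur.countP (pvIsKol T)
    · have hcond : pvCountKol T cur = 0 ∨ pvCountNormal T cur ≥ 10 * pvCountKol T cur := by
        rw [pvCountKol_eq, pvCountNormal_eq]; omega
      have hneed : pvNeedRaw T cur = 0 := by unfold pvNeedRaw; rw [if_pos hc]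
      rw [hstep, if_pos hcond, hneed]
      simp [pvSubst_nil]
    · have hcond : ¬(pvCountKol T cur = 0 ∨ pvCountNormal T cur ≥ 10 * pvCountKol T cur) := by
        rw [pvCountKol_eq, pvCountNormal_eq]; omega
      rw [hstep, if_neg hcond]
      cases hv : cur.find? (pvVict T M) with
      | none =>
        simp only [hv]
        rw [pvSubst_no_victim T M cur _ hv]
      | some v =>
        cases hre : pvRepsF (pvIsKol T) P (fun y => cur.contains y) with
        | nil =>
          simp only [hv, pv_contains_ofList, pvRepsF_nil (pvIsKol T) P _ hre]
          simp [pvSubst_nil]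
        | cons r rs =>
          obtain ⟨hfind, hkr, hnext⟩ := pvRepsF_cons (pvIsKol T) P _ r rs hre
          obtain ⟨i, hi, hset⟩ := pv_index_set_eq_replF (pvVict T M) r cur v hv
          simp only [hv, pv_contains_ofList, hfind, hi]
          rw [hset, ih]
          -- rewrite the recursive state's replacement stream and need
          have hvr : pvVict T M r = false := by unfold pvVict; rw [hkr]; rfl
          have hr2 : pvRepsF (pvIsKol T) P (fun y => (pvReplF (pvVict T M) r cur).contains y) = rs := by
            rw [pvRepsF_congr (pvIsKol T) P _ (fun y => y == r || cur.contains y)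
              (fun y hy => pv_contains_replF T M r cur v y hv hy)]
            exact hnext
          have hk' : (pvReplF (pvVict T M) r cur).countP (pvIsKol T) + 1 = cur.countP (pvIsKol T) :=
            pv_countP_replF T M r hkr cur v hv
          have hlen' : (pvReplF (pvVict T M) r cur).length = cur.length :=
            pv_length_replF (pvVict T M) r cur
          have hneed1 : 1 ≤ pvNeedRaw T cur := by
            unfold pvNeedRaw; rw [if_neg hc]; omega
          have hneed' : pvNeedRaw T (pvReplF (pvVict T M) r cur) = pvNeedRaw T cur - 1 := by
            unfold pvNeedRaw
            rw [if_neg hc, hlen']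
            by_cases hc' : (pvReplF (pvVict T M) r cur).countP (pvIsKol T) = 0 ∨
                10 * (pvReplF (pvVict T M) r cur).countP (pvIsKol T) ≤
                  cur.length - (pvReplF (pvVict T M) r cur).countP (pvIsKol T)
            · rw [if_pos hc']; omega
            · rw [if_neg hc']; omega
          have hmin : min (pvNeedRaw T cur) (fuel + 1) = min (pvNeedRaw T cur - 1) fuel + 1 := by
            omega
          rw [hr2, hneed', hmin, List.take_succ_cons, pvSubst_step T M r hvr cur]

-- ===== VERDICT (by name: the statement is the Claim_ definition above) =====
theorem relax_kol_normal_in_set_spec : Claim_equal_relax_kol_normal_in_set := by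
  unfold Claim_equal_relax_kol_normal_in_set
  intro chosen types pool mandatory _
  unfold Spec_relax_kol_normal_in_set relax_kol_normal_in_set relax_kol_normal_in_set_alt
  rw [pvLoopA_eq, pvPickReps_eq_repsF,
    pvRepsF_congr (pvIsKol types) pool
      (fun y => PySem.Set.contains (PySem.Set.ofList chosen) y)
      (fun y => chosen.contains y) (fun y _ => pv_contains_ofList chosen y)]
  by_cases hc : chosen.countP (pvIsKol types) = 0 ∨
      chosen.length - chosen.countP (pvIsKol types) ≥ 10 * chosen.countP (pvIsKol types)
  · have hneed : pvNeedRaw types chosen = 0 := by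
      unfold pvNeedRaw; rw [if_pos (by omega : chosen.countP (pvIsKol types) = 0 ∨
        10 * chosen.countP (pvIsKol types) ≤ chosen.length - chosen.countP (pvIsKol types))]
    rw [if_pos hc, hneed]
    simp [pvSubst_nil]
  · have hneed : pvNeedRaw types chosen =
        (10 * chosen.countP (pvIsKol types) - (chosen.length - chosen.countP (pvIsKol types)) + 10) / 11 := by
      unfold pvNeedRaw; rw [if_neg (by omega : ¬(chosen.countP (pvIsKol types) = 0 ∨
        10 * chosen.countP (pvIsKol types) ≤ chosen.length - chosen.countP (pvIsKol types)))]
    rw [if_neg hc, hneed]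
    simp only [pv_take_min_length]
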